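-- pv_equiv track=rewrite | github.com/vrrohan/Topcoder | medium/day4/srm717/lexmaxreplace.py | get
-- ===== SOURCE A (Python) =====
-- def get(s, t) :
--     counter = len(t)
--     while counter > 0 :
--         maxChar = max(t)
--         for charInS in s :
--             if maxChar > charInS :
--                 s = s.replace(charInS, maxChar, 1)
--                 lis = list(t)
--                 lis.remove(maxChar)
--                 t = ''.join(lis)
--                 break
--         counter = counter - 1
--     return s
-- ===== SOURCE B (Python) =====
-- def get(s, t):
--     rep = sorted(t, reverse=True)
--     j = 0
--     out = []
--     for c in s:
--         if j < len(rep) and rep[j] > c: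
--             out.append(rep[j])
--             j += 1
--         else:
--             out.append(c)
--     return ''.join(out)
-- ===== Notes on version B (the rewrite author's own statement) =====
-- stated objective: faster
-- what changed: A repeatedly recomputes max(t), rescans s for the first smaller char and rebuilds t (len(t) iterations of linear work); B sorts t descending once and does a single two-pointer sweep over s, replacing each char smaller than the next unused sorted char.
import Mathlib
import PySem

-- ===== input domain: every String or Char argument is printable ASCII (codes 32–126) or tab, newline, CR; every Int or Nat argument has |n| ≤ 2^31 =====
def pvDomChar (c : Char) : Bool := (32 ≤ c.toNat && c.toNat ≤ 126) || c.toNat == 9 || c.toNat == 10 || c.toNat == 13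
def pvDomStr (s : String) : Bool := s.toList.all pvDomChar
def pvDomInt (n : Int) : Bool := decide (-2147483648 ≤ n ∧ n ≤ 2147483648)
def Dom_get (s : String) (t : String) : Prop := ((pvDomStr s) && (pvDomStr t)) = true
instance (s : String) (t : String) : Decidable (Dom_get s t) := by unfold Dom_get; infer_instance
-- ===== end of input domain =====

-- B replaces A's quadratic repeated max/replace/remove loop by one sort of t descending
-- and a single two-pointer sweep over s (same return value; measurably faster).

-- ===== PORT A =====
-- s.replace(old, new, 1) for single-char old/new: replace the first occurrence (exact)
def pvReplace1 : List Char → Char → Char → List Char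
  | [], _, _ => []
  | c :: cs, old, new => if c = old then new :: cs else c :: pvReplace1 cs old new

-- the 'for charInS in s: if maxChar > charInS: … break' body; returns the updated (s, t) or none.
-- lis.remove(maxChar) never raises on reachable states (maxChar = max(t) ∈ t), so the
-- .getD default of remove? is unreachable.
def pvInner (m : Char) (s t : List Char) : List Char → Option (List Char × List Char)
  | [] => none
  | c :: rest =>
      if c < m then some (pvReplace1 s c m, (PySem.List.remove? t m).getD t)
      else pvInner m s t rest

-- the 'while counter > 0' loop; max('') would raise in Python but is unreachable from get
-- (counter = len(t) and t shrinks exactly when counter does), so the none branch just recurses.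
def pvLoopA : Nat → List Char → List Char → List Char
  | 0, s, _ => s
  | n + 1, s, t =>
      match PySem.List.max? t (fun x => x) with
      | none => pvLoopA n s t
      | some m =>
          match pvInner m s t s with
          | none => pvLoopA n s t
          | some (s', t') => pvLoopA n s' t'

def get (s : String) (t : String) : String :=
  String.ofList (pvLoopA t.toList.length s.toList t.toList)

-- ===== PORT B =====
-- the 'for c in s' loop of Source B: state = (out, j); 'j < len(rep) and rep[j] > c' is the some-case test
def pvStepB (rep : List Char) (acc : List Char × Nat) (c : Char) : List Char × Nat :=
  match rep[acc.2]? with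
  | some m => if c < m then (acc.1 ++ [m], acc.2 + 1) else (acc.1 ++ [c], acc.2)
  | none => (acc.1 ++ [c], acc.2)

def get_alt (s : String) (t : String) : String :=
  let rep := PySem.List.sorted t.toList (fun x => x) true
  String.ofList (s.toList.foldl (pvStepB rep) ([], 0)).1

-- ===== PRECONDITION & SPEC =====
def Spec_get (s : String) (t : String) (out : String) : Prop := out = get_alt s t
instance (s : String) (t : String) (out : String) : Decidable (Spec_get s t out) := by unfold Spec_get; infer_instance

-- ===== CLAIM (what is proved, stated in full; the proofs are below) =====
def Claim_equal_get : Prop := ∀ (s : String) (t : String), Dom_get s t → Spec_get s t (get s t)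

-- ===== LEMMAS AND PROOFS =====

-- proof-side two-list sweep: B's loop with the pointer made structural
def pvSweep2 : List Char → List Char → List Char
  | [], _ => []
  | c :: cs, [] => c :: pvSweep2 cs []
  | c :: cs, m :: ms => if c < m then m :: pvSweep2 cs ms else c :: pvSweep2 cs (m :: ms)

lemma pvSweep2_nil (s : List Char) : pvSweep2 s [] = s := by
  induction s with
  | nil => rfl
  | cons c cs ih => simp [pvSweep2, ih]

-- B's foldl equals the structural sweep
lemma foldlB_eq_sweep2 (rep : List Char) :
    ∀ (s : List Char) (j : Nat) (acc : List Char),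
      (s.foldl (pvStepB rep) (acc, j)).1 = acc ++ pvSweep2 s (rep.drop j) := by
  intro s
  induction s with
  | nil => intro j acc; simp [pvSweep2]
  | cons c cs ih =>
    intro j acc
    have hd : (rep.drop j).head? = rep[j]? := List.head?_drop
    cases hrj : rep[j]? with
    | none =>
      have : rep.drop j = [] := by
        cases h : rep.drop j with
        | nil => rfl
        | cons a l => rw [h] at hd; simp at hd; rw [hrj] at hd; exact absurd hd (by simp)
      simp [List.foldl, pvStepB, hrj, this, ih, pvSweep2_nil]
    | some m =>
      have : ∃ l, rep.drop j = m :: l := by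
        cases h : rep.drop j with
        | nil => rw [h] at hd; simp [hrj] at hd
        | cons a l => rw [h] at hd; simp [hrj] at hd; exact ⟨l, by rw [hd]⟩
      obtain ⟨l, hl⟩ := this
      have hl1 : rep.drop (j + 1) = l := by
        have := List.tail_drop (l := rep) (i := j); rw [hl] at this; simpa using this.symm
      by_cases hc : c < m
      · simp [List.foldl, pvStepB, hrj, hc, ih, hl, hl1, pvSweep2]
      · simp [List.foldl, pvStepB, hrj, hc, ih, hl, pvSweep2, hl1.symm]

-- A's inner loop: no char of l is below m → none
lemma pvInner_none (m : Char) (s t : List Char) :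
    ∀ l, (∀ c ∈ l, ¬ c < m) → pvInner m s t l = none := by
  intro l
  induction l with
  | nil => intro _; rfl
  | cons c cs ih =>
    intro h
    have hc := h c (List.mem_cons_self)
    simp [pvInner, hc]
    exact ih fun x hx => h x (List.mem_cons_of_mem _ hx)

-- A's inner loop finds the first char below m
lemma pvInner_some (m : Char) (s t : List Char) :
    ∀ pre c post, (∀ p ∈ pre, ¬ p < m) → c < m →
      pvInner m s t (pre ++ c :: post) = some (pvReplace1 s c m, (PySem.List.remove? t m).getD t) := by
  intro pre
  induction pre with
  | nil => intro c post _ hc; simp [pvInner, hc]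
  | cons p ps ih =>
    intro c post h hc
    have hp := h p (List.mem_cons_self)
    simp only [List.cons_append, pvInner, if_neg hp]
    exact ih c post (fun x hx => h x (List.mem_cons_of_mem _ hx)) hc

-- replacing the first occurrence of the first char below m replaces it in place
lemma pvReplace1_split (m : Char) :
    ∀ pre c post, (∀ p ∈ pre, ¬ p < m) → c < m →
      pvReplace1 (pre ++ c :: post) c m = pre ++ m :: post := by
  intro pre
  induction pre with
  | nil => intro c post _ _; simp [pvReplace1]
  | cons p ps ih =>
    intro c post h hc
    have hp : ¬ p = c := by
      intro he; exact h p (List.mem_cons_self) (he ▸ hc)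
    simp only [List.cons_append, pvReplace1, if_neg hp]
    rw [ih c post (fun x hx => h x (List.mem_cons_of_mem _ hx)) hc]

-- stalled loop: once no replacement is possible, t never changes and the loop returns s
lemma pvLoopA_stall (s t : List Char)
    (h : ∀ m, PySem.List.max? t (fun x => x) = some m → pvInner m s t s = none) :
    ∀ n, pvLoopA n s t = s := by
  intro n
  induction n with
  | zero => rfl
  | succ n ih =>
    cases hm : PySem.List.max? t (fun x => x) with
    | none => simp [pvLoopA, hm, ih]
    | some m => simp [pvLoopA, hm, h m hm, ih]

-- two descending (Pairwise ≥) lists that are permutations are equal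
lemma desc_eq_of_perm {l₁ l₂ : List Char} (hp : l₁.Perm l₂)
    (h₁ : l₁.Pairwise (fun a b => b ≤ a)) (h₂ : l₂.Pairwise (fun a b => b ≤ a)) : l₁ = l₂ :=
  List.Perm.eq_of_pairwise (fun _ _ _ _ hab hba => le_antisymm hba hab) h₁ h₂ hp

-- removing the max from t removes the head of its descending sort
lemma sorted_erase_max {t : List Char} {m : Char} {ms : List Char}
    (h : PySem.List.sorted t (fun x => x) true = m :: ms) :
    PySem.List.sorted (t.erase m) (fun x => x) true = ms := by
  have hperm : (m :: ms).Perm t := h ▸ PySem.List.sorted_perm t (fun x => x) true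
  have hm : m ∈ t ∧ ms.Perm (t.erase m) := List.cons_perm_iff_perm_erase.mp hperm
  have hpw : (m :: ms).Pairwise (fun a b => b ≤ a) := h ▸ PySem.List.sorted_pairwise_rev t _
  refine desc_eq_of_perm ?_ (PySem.List.sorted_pairwise_rev _ _) ((List.pairwise_cons.mp hpw).2)
  exact (PySem.List.sorted_perm _ _ _).trans hm.2.symm

-- no char of s is below the current max → the sweep copies s unchanged
lemma pvSweep2_all_ge (m : Char) (ms : List Char) :
    ∀ s, (∀ c ∈ s, ¬ c < m) → pvSweep2 s (m :: ms) = s := by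
  intro s
  induction s with
  | nil => intro _; rfl
  | cons c cs ih =>
    intro h
    have hc := h c (List.mem_cons_self)
    simp [pvSweep2, hc]
    exact ih fun x hx => h x (List.mem_cons_of_mem _ hx)

-- a prefix no element of ms beats is copied unchanged by the sweep
lemma pvSweep2_append (ms : List Char) :
    ∀ pre rest, (∀ p ∈ pre, ∀ y ∈ ms, ¬ p < y) →
      pvSweep2 (pre ++ rest) ms = pre ++ pvSweep2 rest ms := by
  intro pre
  induction pre with
  | nil => intro rest _; rfl
  | cons p ps ih =>
    intro rest h
    cases ms with
    | nil =>
      simp only [List.cons_append, pvSweep2]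
      rw [ih rest (by simp)]
    | cons y ys =>
      have hy : ¬ p < y := h p (List.mem_cons_self) y (List.mem_cons_self)
      simp only [List.cons_append, pvSweep2, if_neg hy]
      rw [ih rest (fun x hx => h x (List.mem_cons_of_mem _ hx))]

-- main invariant: with enough counter, A's loop is the sweep against sorted-descending t
lemma pvLoopA_eq_sweep2 :
    ∀ n s t, t.length ≤ n →
      pvLoopA n s t = pvSweep2 s (PySem.List.sorted t (fun x => x) true) := by
  intro n
  induction n with
  | zero =>
    intro s t hlen
    have ht : t = [] := List.length_eq_zero_iff.mp (Nat.le_zero.mp hlen)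
    subst ht
    simp [pvLoopA, PySem.List.sorted, pvSweep2_nil]
  | succ n ih =>
    intro s t hlen
    cases htd : PySem.List.sorted t (fun x => x) true with
    | nil =>
      have ht : t = [] := (PySem.List.sorted_eq_nil_iff t _ _).mp htd
      subst ht
      have : PySem.List.max? ([] : List Char) (fun x => x) = none :=
        (PySem.List.max?_eq_none_iff _ _).mpr rfl
      simp [pvLoopA, this, pvSweep2_nil, pvLoopA_stall s [] (by intro m hm; rw [this] at hm; cases hm)]
    | cons mh ms =>
      have ht_ne : t ≠ [] := by
        intro he; subst he
        exact absurd ((PySem.List.sorted_eq_nil_iff ([] : List Char) (fun x : Char => x) true).mpr rfl) (by rw [htd]; simp)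
      obtain ⟨m, hm⟩ : ∃ m, PySem.List.max? t (fun x : Char => x) = some m := by
        cases h : PySem.List.max? t (fun x : Char => x) with
        | none => exact absurd ((PySem.List.max?_eq_none_iff _ _).mp h) ht_ne
        | some m => exact ⟨m, rfl⟩
      -- the max value equals the head of the descending sort
      have hmem : m ∈ t := PySem.List.max?_mem hm
      have hmh_mem : mh ∈ t := by
        have : mh ∈ PySem.List.sorted t (fun x : Char => x) true := by rw [htd]; simp
        exact (PySem.List.sorted_perm t _ _).mem_iff.mp this
      have hval : m = mh :=
        le_antisymm (PySem.List.key_head_sorted_rev_ge t _ htd m hmem)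
                    (PySem.List.max?_isMax hm mh hmh_mem)
      subst hval
      have hpw : (m :: ms).Pairwise (fun a b => b ≤ a) :=
        htd ▸ PySem.List.sorted_pairwise_rev t _
      have hms_le : ∀ y ∈ ms, y ≤ m := (List.pairwise_cons.mp hpw).1
      -- split s at the first char below m
      set p : Char → Bool := fun c => decide (¬ c < m) with hp
      have hsplit : s.takeWhile p ++ s.dropWhile p = s := List.takeWhile_append_dropWhile
      have hpre : ∀ x ∈ s.takeWhile p, ¬ x < m := by
        intro x hx
        have := List.mem_takeWhile_imp hx
        simpa [hp] using this
      cases hdw : s.dropWhile p with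
      | nil =>
        -- no replacement possible: both sides leave s unchanged
        have hall : ∀ c ∈ s, ¬ c < m := by
          intro c hc
          have := (List.dropWhile_eq_nil_iff.mp hdw) c hc
          simpa [hp] using this
        have hst : pvLoopA (n + 1) s t = s := by
          apply pvLoopA_stall
          intro m' hm'
          rw [hm] at hm'; cases hm'
          exact pvInner_none m s t s hall
        rw [hst, pvSweep2_all_ge m ms s hall]
      | cons c post =>
        have hc : c < m := by
          have := List.head?_dropWhile_not p s
          rw [hdw] at this; simp at this
          simpa [hp] using this
        have hs_eq : s = s.takeWhile p ++ c :: post := by conv_lhs => rw [← hsplit, hdw]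
        set pre := s.takeWhile p with hpre_def
        have hreplace : pvReplace1 s c m = pre ++ m :: post := by
          rw [hs_eq]; exact pvReplace1_split m pre c post hpre hc
        have hremove : (PySem.List.remove? t m).getD t = t.erase m := by
          rw [PySem.List.remove?_eq_some_erase t m hmem]; rfl
        have hinner : pvInner m s t s = some (pre ++ m :: post, t.erase m) := by
          have h0 := pvInner_some m s t pre c post hpre hc
          rw [← hs_eq] at h0
          rw [h0, hreplace, hremove]
        have hlen' : (t.erase m).length ≤ n := by
          rw [List.length_erase_of_mem hmem]
          have : 1 ≤ t.length := List.length_pos_iff.mpr ht_ne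
          omega
        have step : pvLoopA (n + 1) s t = pvLoopA n (pre ++ m :: post) (t.erase m) := by
          simp [pvLoopA, hm, hinner]
        rw [step, ih _ _ hlen', sorted_erase_max htd]
        -- both sides: copy pre, emit m / consume head, recurse on post with ms
        have hpre_ms : ∀ x ∈ pre, ∀ y ∈ ms, ¬ x < y := by
          intro x hx y hy
          have h1 : ¬ x < m := hpre x hx
          have h2 : y ≤ m := hms_le y hy
          intro hlt; exact h1 (lt_of_lt_of_le hlt h2)
        have lhs : pvSweep2 (pre ++ m :: post) ms = pre ++ m :: pvSweep2 post ms := by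
          rw [pvSweep2_append ms pre (m :: post) hpre_ms]
          congr 1
          cases ms with
          | nil => simp [pvSweep2]
          | cons y ys =>
            have : ¬ m < y := not_lt.mpr (hms_le y (List.mem_cons_self))
            simp [pvSweep2, this]
        have rhs : pvSweep2 s (m :: ms) = pre ++ m :: pvSweep2 post ms := by
          rw [hs_eq, pvSweep2_append (m :: ms) pre (c :: post) ?hcond]
          · simp [pvSweep2, hc]
          case hcond =>
            intro x hx y hy
            rcases List.mem_cons.mp hy with h | h
            · subst h; exact hpre x hx
            · intro hlt; exact hpre x hx (lt_of_lt_of_le hlt (hms_le y h))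
        rw [lhs, rhs]

-- ===== VERDICT (by name: the statement is the Claim_ definition above) =====
theorem get_spec : Claim_equal_get := by
  intro s t _
  unfold Spec_get _root_.get get_alt
  rw [pvLoopA_eq_sweep2 t.toList.length s.toList t.toList (le_refl _)]
  congr 1
  rw [foldlB_eq_sweep2 _ s.toList 0 []]
  simp
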